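-- pv_equiv track=rewrite | github.com/telesol/ladder | find_coefficient_pattern.py | find_all_recurrence_coefficients
-- ===== SOURCE A (Python) =====
-- m_seq = {
--     2: 3, 3: 7, 4: 22, 5: 27, 6: 57, 7: 150, 8: 184, 9: 493,
--     10: 1444, 11: 1921, 12: 3723, 13: 8342, 14: 16272, 15: 26989,
--     16: 67760, 17: 138269, 18: 255121, 19: 564091, 20: 900329
-- }
--
-- def find_all_recurrence_coefficients(max_search=50):
--     """Find ALL valid (a,b) pairs for each n."""
--     results = {}
--
--     for n in sorted(m_seq.keys())[2:]:
--         if n-1 not in m_seq or n-2 not in m_seq: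
--             continue
--
--         m_n = m_seq[n]
--         m_n1 = m_seq[n-1]
--         m_n2 = m_seq[n-2]
--
--         solutions = []
--         for a in range(-max_search, max_search+1):
--             for b in range(-max_search, max_search+1):
--                 if a * m_n1 + b * m_n2 == m_n:
--                     solutions.append((a, b))
--
--         results[n] = solutions
--
--     return results
-- ===== SOURCE B (Python) =====
-- m_seq = {
--     2: 3, 3: 7, 4: 22, 5: 27, 6: 57, 7: 150, 8: 184, 9: 493,
--     10: 1444, 11: 1921, 12: 3723, 13: 8342, 14: 16272, 15: 26989,
--     16: 67760, 17: 138269, 18: 255121, 19: 564091, 20: 900329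
-- }
--
-- def find_all_recurrence_coefficients(max_search=50):
--     """Find ALL valid (a,b) pairs for each n: solve b from a instead of scanning b."""
--     ks = sorted(m_seq)
--     vs = [m_seq[k] for k in ks]
--     return {
--         n: [(a, (mn - a * mn1) // mn2)
--             for a in range(-max_search, max_search + 1)
--             if (mn - a * mn1) % mn2 == 0
--             and -max_search <= (mn - a * mn1) // mn2 <= max_search]
--         for n, mn, mn1, mn2 in zip(ks[2:], vs[2:], vs[1:], vs)
--     }
-- ===== Notes on version B (the rewrite author's own statement) =====
-- stated objective: faster
-- what changed: B drops the inner b-scan entirely: it zips the sorted key/value lists into consecutive triples and, for each a, solves b = (m_n - a*m_n1) // m_n2 with a divisibility and range check, building each solution list as a comprehension instead of A's nested scan with dict lookups.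
import Mathlib
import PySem

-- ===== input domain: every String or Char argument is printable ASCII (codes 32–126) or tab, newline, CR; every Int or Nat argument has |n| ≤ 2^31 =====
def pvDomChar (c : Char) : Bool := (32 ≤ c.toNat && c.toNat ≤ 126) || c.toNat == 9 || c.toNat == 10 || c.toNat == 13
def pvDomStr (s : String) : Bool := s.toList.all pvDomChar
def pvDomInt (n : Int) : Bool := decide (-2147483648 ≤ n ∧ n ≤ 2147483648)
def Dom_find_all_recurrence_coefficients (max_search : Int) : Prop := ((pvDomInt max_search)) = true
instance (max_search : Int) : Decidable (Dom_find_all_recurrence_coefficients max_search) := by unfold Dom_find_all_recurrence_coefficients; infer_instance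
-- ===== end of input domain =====

-- B removes A's inner brute-force b-scan: it zips the sorted key/value lists into consecutive
-- triples and, per a, solves b = (m_n - a*m_n1) // m_n2 with a divisibility and range check.

-- ===== PORT A =====
def pv_m_seq : PySem.Dict Int Int :=
  PySem.Dict.ofList [(2,3),(3,7),(4,22),(5,27),(6,57),(7,150),(8,184),(9,493),
    (10,1444),(11,1921),(12,3723),(13,8342),(14,16272),(15,26989),
    (16,67760),(17,138269),(18,255121),(19,564091),(20,900329)]

-- A's inner double loop over a and b
def pvInnerA (max_search m_n m_n1 m_n2 : Int) : List (Int × Int) :=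
  (PySem.List.pyRange (-max_search) (max_search+1) 1).foldl (fun sols a =>
    (PySem.List.pyRange (-max_search) (max_search+1) 1).foldl (fun sols b =>
      if a * m_n1 + b * m_n2 = m_n then sols ++ [(a, b)] else sols) sols) []

def find_all_recurrence_coefficients (max_search : Int) : List (Int × List (Int × Int)) :=
  ((PySem.List.slice (PySem.List.sorted (PySem.Dict.keys pv_m_seq) (fun x => x) false) (some 2) none).foldl
    (fun results n =>
      if ¬ (pv_m_seq.contains (n-1)) ∨ ¬ (pv_m_seq.contains (n-2)) then results
      else
        results.insert n (pvInnerA max_search (pv_m_seq.getD n 0) (pv_m_seq.getD (n-1) 0) (pv_m_seq.getD (n-2) 0)))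
    PySem.Dict.empty).items

-- ===== PORT B =====
-- B's comprehension over a only, solving for b
def pvSolutionsB (max_search m_n m_n1 m_n2 : Int) : List (Int × Int) :=
  (PySem.List.pyRange (-max_search) (max_search+1) 1).filterMap (fun a =>
    if PySem.Int.mod (m_n - a * m_n1) m_n2 = 0 ∧
       -max_search ≤ PySem.Int.floordiv (m_n - a * m_n1) m_n2 ∧
       PySem.Int.floordiv (m_n - a * m_n1) m_n2 ≤ max_search
    then some (a, PySem.Int.floordiv (m_n - a * m_n1) m_n2) else none)

def find_all_recurrence_coefficients_alt (max_search : Int) : List (Int × List (Int × Int)) :=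
  let ks := PySem.List.sorted (PySem.Dict.keys pv_m_seq) (fun x => x) false
  let vs := ks.map (fun k => pv_m_seq.getD k 0)
  (List.zip (PySem.List.slice ks (some 2) none)
    (List.zip (PySem.List.slice vs (some 2) none)
      (List.zip (PySem.List.slice vs (some 1) none) vs))).map
    (fun t => (t.1, pvSolutionsB max_search t.2.1 t.2.2.1 t.2.2.2))

-- ===== PRECONDITION & SPEC =====
def Spec_find_all_recurrence_coefficients (max_search : Int) (out : List (Int × List (Int × Int))) : Prop := out = find_all_recurrence_coefficients_alt max_search
instance (max_search : Int) (out : List (Int × List (Int × Int))) : Decidable (Spec_find_all_recurrence_coefficients max_search out) := by unfold Spec_find_all_recurrence_coefficients; infer_instance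

-- ===== CLAIM (what is proved, stated in full; the proofs are below) =====
def Claim_equal_find_all_recurrence_coefficients : Prop := ∀ (max_search : Int), Dom_find_all_recurrence_coefficients max_search → Spec_find_all_recurrence_coefficients max_search (find_all_recurrence_coefficients max_search)

-- ===== LEMMAS AND PROOFS =====

-- filtering an increasing unit range for one value keeps exactly that value when it is in range
lemma pv_filter_range_eq (lo hi q : Int) :
    (PySem.List.pyRange lo hi 1).filter (fun b => decide (b = q)) =
      if lo ≤ q ∧ q < hi then [q] else [] := by
  generalize hN : (hi - lo).toNat = N
  induction N generalizing lo with
  | zero =>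
      rw [PySem.List.pyRange_one_eq_nil (by omega)]
      rw [if_neg (by omega)]
      rfl
  | succ n ih =>
      rw [PySem.List.pyRange_one_cons (by omega), List.filter_cons]
      rw [ih (lo + 1) (by omega)]
      by_cases hq : lo = q
      · subst hq
        rw [if_pos (by simp), if_neg (by omega), if_pos (by omega)]
      · rw [if_neg (by simp [hq])]
        split_ifs with h1 h2 <;> first | rfl | omega

-- B's per-a option: divisibility plus range check
def pvOptB (max_search m_n m_n1 m_n2 a : Int) : Option (Int × Int) :=
  if PySem.Int.mod (m_n - a * m_n1) m_n2 = 0 ∧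
     -max_search ≤ PySem.Int.floordiv (m_n - a * m_n1) m_n2 ∧
     PySem.Int.floordiv (m_n - a * m_n1) m_n2 ≤ max_search
  then some (a, PySem.Int.floordiv (m_n - a * m_n1) m_n2) else none

-- A's inner b-scan for one a contributes exactly B's solved option
lemma pv_body_eq (max_search m_n m_n1 m_n2 : Int) (h2 : 0 < m_n2) (a : Int) (sols : List (Int × Int)) :
    (PySem.List.pyRange (-max_search) (max_search+1) 1).foldl (fun sols b =>
      if a * m_n1 + b * m_n2 = m_n then sols ++ [(a, b)] else sols) sols
      = sols ++ (pvOptB max_search m_n m_n1 m_n2 a).toList := by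
  rw [PySem.List.foldl_append_ite (p := fun b => a * m_n1 + b * m_n2 = m_n) (f := fun b => (a, b))]
  unfold pvOptB
  by_cases hc : PySem.Int.mod (m_n - a * m_n1) m_n2 = 0
  · obtain ⟨b0, hb0⟩ := (PySem.Int.mod_eq_zero_iff_dvd _ _).mp hc
    have hq : PySem.Int.floordiv (m_n - a * m_n1) m_n2 = b0 := by
      rw [hb0, PySem.Int.floordiv_eq_ediv_of_pos h2,
        Int.mul_ediv_cancel_left _ (by omega : m_n2 ≠ 0)]
    have hpred : ∀ b ∈ PySem.List.pyRange (-max_search) (max_search+1) 1,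
        decide (a * m_n1 + b * m_n2 = m_n) = decide (b = b0) := by
      intro b _
      rw [mul_comm m_n2 b0] at hb0
      have : (a * m_n1 + b * m_n2 = m_n) ↔ b = b0 := by
        constructor
        · intro h
          have : b * m_n2 = b0 * m_n2 := by omega
          exact mul_right_cancel₀ (by omega) this
        · intro h; subst h; omega
      simp [this]
    rw [List.filter_congr hpred, pv_filter_range_eq]
    rw [hq]
    split_ifs with hA hB hB <;> simp <;> omega
  · have hnd : ¬ (m_n2 ∣ (m_n - a * m_n1)) := fun h => hc ((PySem.Int.mod_eq_zero_iff_dvd _ _).mpr h)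
    have hfil : (PySem.List.pyRange (-max_search) (max_search+1) 1).filter
        (fun b => decide (a * m_n1 + b * m_n2 = m_n)) = [] := by
      rw [List.filter_eq_nil_iff]
      intro b _
      simp only [decide_eq_true_eq]
      intro h
      exact hnd ⟨b, by rw [mul_comm m_n2 b]; omega⟩
    rw [hfil, if_neg (by tauto)]
    simp

-- flatMapping option singletons is filterMap
lemma pv_flatMap_toList {α β : Type} (f : α → Option β) (l : List α) :
    l.flatMap (fun a => (f a).toList) = l.filterMap f := by
  induction l with
  | nil => rfl
  | cons a l ih =>
      simp only [List.flatMap_cons, List.filterMap_cons]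
      cases f a <;> simp [ih]

-- A's double scan equals B's solved comprehension
lemma pv_inner_eq (max_search m_n m_n1 m_n2 : Int) (h2 : 0 < m_n2) :
    pvInnerA max_search m_n m_n1 m_n2 = pvSolutionsB max_search m_n m_n1 m_n2 := by
  unfold pvInnerA pvSolutionsB
  refine (PySem.List.foldl_congr_mem _ _
      (fun sols a => sols ++ (pvOptB max_search m_n m_n1 m_n2 a).toList) []
      (fun sols a _ => pv_body_eq max_search m_n m_n1 m_n2 h2 a sols)).trans ?_
  rw [PySem.List.foldl_append_eq_flatMap]
  rw [pv_flatMap_toList]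
  rfl

-- A's dict-building fold, stated generically: it produces exactly the filtered key list paired with its values
lemma pv_items_foldl (P : Int → Prop) [DecidablePred P] (f : Int → List (Int × Int)) :
    ∀ (ns : List Int) (d : PySem.Dict Int (List (Int × Int))),
      (∀ n ∈ ns, d.contains n = false) → ns.Nodup →
      (ns.foldl (fun results n => if P n then results else results.insert n (f n)) d).items
        = d.items ++ (ns.filter (fun n => !decide (P n))).map (fun n => (n, f n)) := by
  intro ns
  induction ns with
  | nil => intro d _ _; simp
  | cons n ns ih =>
      intro d hc hnd
      simp only [List.foldl_cons, List.filter_cons]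
      by_cases hP : P n
      · rw [if_pos hP]
        rw [ih d (fun k hk => hc k (List.mem_cons_of_mem _ hk)) (List.Nodup.of_cons hnd)]
        simp [hP]
      · rw [if_neg hP]
        have hcn : d.contains n = false := hc n (List.mem_cons_self ..)
        rw [ih (d.insert n (f n)) ?_ (List.Nodup.of_cons hnd)]
        · rw [PySem.Dict.items_insert_of_not_contains _ _ hcn]
          simp [hP]
        · intro k hk
          rw [PySem.Dict.contains_insert]
          have hkn : k ≠ n := by
            rintro rfl
            exact (List.nodup_cons.mp hnd).1 hk
          simp [hkn, hc k (List.mem_cons_of_mem _ hk)]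

-- ===== VERDICT (by name: the statement is the Claim_ definition above) =====
theorem find_all_recurrence_coefficients_spec : Claim_equal_find_all_recurrence_coefficients := by
  intro M _
  unfold Spec_find_all_recurrence_coefficients
  unfold find_all_recurrence_coefficients find_all_recurrence_coefficients_alt
  have hA := pv_items_foldl
    (fun n => ¬ (pv_m_seq.contains (n-1)) ∨ ¬ (pv_m_seq.contains (n-2)))
    (fun n => pvInnerA M (pv_m_seq.getD n 0) (pv_m_seq.getD (n-1) 0) (pv_m_seq.getD (n-2) 0))
    (PySem.List.slice (PySem.List.sorted (PySem.Dict.keys pv_m_seq) (fun x => x) false) (some 2) none)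
    PySem.Dict.empty (by decide) (by decide)
  refine hA.trans ?_
  have hfA : (PySem.List.slice (PySem.List.sorted (PySem.Dict.keys pv_m_seq) (fun x => x) false) (some 2) none).filter
      (fun n => !decide (¬ (pv_m_seq.contains (n-1)) ∨ ¬ (pv_m_seq.contains (n-2)))) =
      [4,5,6,7,8,9,10,11,12,13,14,15,16,17,18,19,20] := by decide
  have hempty : (PySem.Dict.empty : PySem.Dict Int (List (Int × Int))).items = [] := by decide
  rw [hfA, hempty, List.nil_append]
  have hT : (List.zip (PySem.List.slice (PySem.List.sorted (PySem.Dict.keys pv_m_seq) (fun x => x) false) (some 2) none)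
      (List.zip (PySem.List.slice ((PySem.List.sorted (PySem.Dict.keys pv_m_seq) (fun x => x) false).map (fun k => pv_m_seq.getD k 0)) (some 2) none)
        (List.zip (PySem.List.slice ((PySem.List.sorted (PySem.Dict.keys pv_m_seq) (fun x => x) false).map (fun k => pv_m_seq.getD k 0)) (some 1) none)
          ((PySem.List.sorted (PySem.Dict.keys pv_m_seq) (fun x => x) false).map (fun k => pv_m_seq.getD k 0))))) =
      ([(4,(22,(7,3))), (5,(27,(22,7))), (6,(57,(27,22))), (7,(150,(57,27))), (8,(184,(150,57))), (9,(493,(184,150))), (10,(1444,(493,184))), (11,(1921,(1444,493))), (12,(3723,(1921,1444))), (13,(8342,(3723,1921))), (14,(16272,(8342,3723))), (15,(26989,(16272,8342))), (16,(67760,(26989,16272))), (17,(138269,(67760,26989))), (18,(255121,(138269,67760))), (19,(564091,(255121,138269))), (20,(900329,(564091,255121)))] : List (Int × Int × Int × Int)) := by decide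
  show _ = (List.zip _ _).map _
  rw [hT]
  have hstep : ([4,5,6,7,8,9,10,11,12,13,14,15,16,17,18,19,20] : List Int).map
      (fun n => (n, pvInnerA M (pv_m_seq.getD n 0) (pv_m_seq.getD (n-1) 0) (pv_m_seq.getD (n-2) 0))) =
      ([4,5,6,7,8,9,10,11,12,13,14,15,16,17,18,19,20] : List Int).map
      (fun n => (n, pvSolutionsB M (pv_m_seq.getD n 0) (pv_m_seq.getD (n-1) 0) (pv_m_seq.getD (n-2) 0))) := by
    refine List.map_congr_left (fun n hn => ?_)
    fin_cases hn <;>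
      exact congrArg (Prod.mk _) (pv_inner_eq M _ _ _ (by decide))
  rw [hstep]
  have g0 : pv_m_seq.getD (4:Int) 0 = 22 := by decide
  have g1 : pv_m_seq.getD ((4:Int)-1) 0 = 7 := by decide
  have g2 : pv_m_seq.getD ((4:Int)-2) 0 = 3 := by decide
  have g3 : pv_m_seq.getD (5:Int) 0 = 27 := by decide
  have g4 : pv_m_seq.getD ((5:Int)-1) 0 = 22 := by decide
  have g5 : pv_m_seq.getD ((5:Int)-2) 0 = 7 := by decide
  have g6 : pv_m_seq.getD (6:Int) 0 = 57 := by decide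
  have g7 : pv_m_seq.getD ((6:Int)-1) 0 = 27 := by decide
  have g8 : pv_m_seq.getD ((6:Int)-2) 0 = 22 := by decide
  have g9 : pv_m_seq.getD (7:Int) 0 = 150 := by decide
  have g10 : pv_m_seq.getD ((7:Int)-1) 0 = 57 := by decide
  have g11 : pv_m_seq.getD ((7:Int)-2) 0 = 27 := by decide
  have g12 : pv_m_seq.getD (8:Int) 0 = 184 := by decide
  have g13 : pv_m_seq.getD ((8:Int)-1) 0 = 150 := by decide
  have g14 : pv_m_seq.getD ((8:Int)-2) 0 = 57 := by decide
  have g15 : pv_m_seq.getD (9:Int) 0 = 493 := by decide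
  have g16 : pv_m_seq.getD ((9:Int)-1) 0 = 184 := by decide
  have g17 : pv_m_seq.getD ((9:Int)-2) 0 = 150 := by decide
  have g18 : pv_m_seq.getD (10:Int) 0 = 1444 := by decide
  have g19 : pv_m_seq.getD ((10:Int)-1) 0 = 493 := by decide
  have g20 : pv_m_seq.getD ((10:Int)-2) 0 = 184 := by decide
  have g21 : pv_m_seq.getD (11:Int) 0 = 1921 := by decide
  have g22 : pv_m_seq.getD ((11:Int)-1) 0 = 1444 := by decide
  have g23 : pv_m_seq.getD ((11:Int)-2) 0 = 493 := by decide
  have g24 : pv_m_seq.getD (12:Int) 0 = 3723 := by decide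
  have g25 : pv_m_seq.getD ((12:Int)-1) 0 = 1921 := by decide
  have g26 : pv_m_seq.getD ((12:Int)-2) 0 = 1444 := by decide
  have g27 : pv_m_seq.getD (13:Int) 0 = 8342 := by decide
  have g28 : pv_m_seq.getD ((13:Int)-1) 0 = 3723 := by decide
  have g29 : pv_m_seq.getD ((13:Int)-2) 0 = 1921 := by decide
  have g30 : pv_m_seq.getD (14:Int) 0 = 16272 := by decide
  have g31 : pv_m_seq.getD ((14:Int)-1) 0 = 8342 := by decide
  have g32 : pv_m_seq.getD ((14:Int)-2) 0 = 3723 := by decide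
  have g33 : pv_m_seq.getD (15:Int) 0 = 26989 := by decide
  have g34 : pv_m_seq.getD ((15:Int)-1) 0 = 16272 := by decide
  have g35 : pv_m_seq.getD ((15:Int)-2) 0 = 8342 := by decide
  have g36 : pv_m_seq.getD (16:Int) 0 = 67760 := by decide
  have g37 : pv_m_seq.getD ((16:Int)-1) 0 = 26989 := by decide
  have g38 : pv_m_seq.getD ((16:Int)-2) 0 = 16272 := by decide
  have g39 : pv_m_seq.getD (17:Int) 0 = 138269 := by decide
  have g40 : pv_m_seq.getD ((17:Int)-1) 0 = 67760 := by decide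
  have g41 : pv_m_seq.getD ((17:Int)-2) 0 = 26989 := by decide
  have g42 : pv_m_seq.getD (18:Int) 0 = 255121 := by decide
  have g43 : pv_m_seq.getD ((18:Int)-1) 0 = 138269 := by decide
  have g44 : pv_m_seq.getD ((18:Int)-2) 0 = 67760 := by decide
  have g45 : pv_m_seq.getD (19:Int) 0 = 564091 := by decide
  have g46 : pv_m_seq.getD ((19:Int)-1) 0 = 255121 := by decide
  have g47 : pv_m_seq.getD ((19:Int)-2) 0 = 138269 := by decide
  have g48 : pv_m_seq.getD (20:Int) 0 = 900329 := by decide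
  have g49 : pv_m_seq.getD ((20:Int)-1) 0 = 564091 := by decide
  have g50 : pv_m_seq.getD ((20:Int)-2) 0 = 255121 := by decide
  simp only [List.map_cons, List.map_nil, g0, g1, g2, g3, g4, g5, g6, g7, g8, g9, g10, g11, g12, g13, g14, g15, g16, g17, g18, g19, g20, g21, g22, g23, g24, g25, g26, g27, g28, g29, g30, g31, g32, g33, g34, g35, g36, g37, g38, g39, g40, g41, g42, g43, g44, g45, g46, g47, g48, g49, g50]
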